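-- pv_equiv track=rewrite | github.com/YallaPapi/snowflake | scripts/export_manuscript.py | parse_manuscript
-- ===== SOURCE A (Python) =====
-- def parse_manuscript(content):
--     """Parse markdown manuscript into structured content"""
--     lines = content.split('\n')
--     title = None
--     author = None
--     chapters = []
--     current_chapter = None
--     current_content = []
--
--     for line in lines:
--         line = line.strip()
--
--         # Extract title (first occurrence of # title)
--         if line.startswith('# ') and title is None:
--             title = line[2:].strip()
--             continue
--
--         # Extract author (look for "By " line)
--         if line.startswith('By ') and author is None:
--             author = line[3:].strip()
--             continue
--
--         # Chapter headers
--         if line.startswith('## Chapter ') or line.startswith('**Chapter '):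
--             # Save previous chapter
--             if current_chapter is not None:
--                 chapters.append({
--                     'title': current_chapter,
--                     'content': '\n'.join(current_content).strip()
--                 })
--
--             # Start new chapter
--             if line.startswith('## Chapter '):
--                 current_chapter = line[3:].strip()
--             else:
--                 current_chapter = line.replace('**', '').strip()
--             current_content = []
--             continue
--
--         # Skip markdown separators and empty lines at start
--         if line in ['---', ''] and not current_content:
--             continue
--
--         # Add content to current chapter
--         if current_chapter is not None:
--             current_content.append(line)
--
--     # Add final chapter
--     if current_chapter is not None:
--         chapters.append({
--             'title': current_chapter,
--             'content': '\n'.join(current_content).strip()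
--         })
--
--     return title, author, chapters
-- ===== SOURCE B (Python) =====
-- def _is_header(line):
--     return line.startswith('## Chapter ') or line.startswith('**Chapter ')
--
--
-- def _chapter_title(line):
--     if line.startswith('## Chapter '):
--         return line[3:].strip()
--     return line.replace('**', '').strip()
--
--
-- def _drop_first(lines, prefix):
--     """Remove the first line starting with prefix (if any)."""
--     for i, line in enumerate(lines):
--         if line.startswith(prefix):
--             return lines[:i] + lines[i + 1:]
--     return lines
--
--
-- def _span(pred, lines):
--     """Longest prefix satisfying pred, and the rest."""
--     i = 0
--     while i < len(lines) and pred(lines[i]):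
--         i += 1
--     return lines[:i], lines[i:]
--
--
-- def parse_manuscript(content):
--     stripped = [l.strip() for l in content.split('\n')]
--     title = next((l[2:].strip() for l in stripped if l.startswith('# ')), None)
--     author = next((l[3:].strip() for l in stripped if l.startswith('By ')), None)
--     rest = _drop_first(_drop_first(stripped, '# '), 'By ')
--     # discard everything before the first chapter header
--     _, rest = _span(lambda l: not _is_header(l), rest)
--     chapters = []
--     while rest:
--         header, rest = rest[0], rest[1:]
--         body, rest = _span(lambda l: not _is_header(l), rest)
--         k = 0
--         while k < len(body) and body[k] in ('---', ''):
--             k += 1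
--         chapters.append({'title': _chapter_title(header),
--                          'content': '\n'.join(body[k:]).strip()})
--     return title, author, chapters
-- ===== Notes on version B (the rewrite author's own statement) =====
-- stated objective: alternative
-- what changed: Replaced A's single stateful for-loop (five mutable variables: title, author, chapters, current chapter, current content) with a multi-pass pipeline: strip all lines once, pull out the first title line and the first byline, delete those two lines from the stream, then segment the remaining lines at chapter headers with span-style slices, dropping leading separator/empty lines per segment.
import Mathlib
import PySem

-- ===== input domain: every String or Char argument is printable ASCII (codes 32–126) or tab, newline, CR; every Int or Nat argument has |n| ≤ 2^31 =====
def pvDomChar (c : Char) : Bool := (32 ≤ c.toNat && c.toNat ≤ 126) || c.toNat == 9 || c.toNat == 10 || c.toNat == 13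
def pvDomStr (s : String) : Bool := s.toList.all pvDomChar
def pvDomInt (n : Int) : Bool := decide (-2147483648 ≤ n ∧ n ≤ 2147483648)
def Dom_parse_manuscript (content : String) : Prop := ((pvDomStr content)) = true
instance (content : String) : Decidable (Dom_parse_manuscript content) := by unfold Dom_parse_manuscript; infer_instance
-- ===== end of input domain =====

-- B re-decomposes A's single stateful loop as a multi-pass pipeline (extract title/author, then segment
-- the remaining lines at chapter headers); objective: alternative decomposition, same asymptotic cost.

-- ===== PORT A =====
-- literal transliteration of A's for-loop: state = (title, author, chapters, current_chapter, current_content)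
def pvALoop : List String → Option String → Option String → List (List (String × String)) →
    Option String → List String → Option String × Option String × List (List (String × String))
  | [], title, author, chapters, cur, acc =>
      (title, author,
        chapters ++ (match cur with
          | some ch => [[("title", ch), ("content", PySem.Str.strip (PySem.Str.join "\n" acc))]]
          | none => []))
  | line :: rest, title, author, chapters, cur, acc =>
      let l := PySem.Str.strip line
      if PySem.Str.startswith l "# " && title.isNone then
        pvALoop rest (some (PySem.Str.strip (PySem.Str.slice l (some 2) none))) author chapters cur acc
      else if PySem.Str.startswith l "By " && author.isNone then
        pvALoop rest title (some (PySem.Str.strip (PySem.Str.slice l (some 3) none))) chapters cur acc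
      else if PySem.Str.startswith l "## Chapter " || PySem.Str.startswith l "**Chapter " then
        pvALoop rest title author
          (chapters ++ (match cur with
            | some ch => [[("title", ch), ("content", PySem.Str.strip (PySem.Str.join "\n" acc))]]
            | none => []))
          (some (if PySem.Str.startswith l "## Chapter " then
                   PySem.Str.strip (PySem.Str.slice l (some 3) none)
                 else
                   PySem.Str.strip (PySem.Str.replace l "**" "")))
          []
      else if (l == "---" || l == "") && acc.isEmpty then
        pvALoop rest title author chapters cur acc
      else if cur.isSome then
        pvALoop rest title author chapters cur (acc ++ [l])
      else
        pvALoop rest title author chapters cur acc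

def parse_manuscript (content : String) : Option String × Option String × (List (List (String × String))) :=
  pvALoop ((PySem.Str.split? content "\n").getD []) none none [] none []

-- ===== PORT B =====
def pvIsT (l : String) : Bool := PySem.Str.startswith l "# "
def pvIsBy (l : String) : Bool := PySem.Str.startswith l "By "
def pvIsHeader (l : String) : Bool :=
  PySem.Str.startswith l "## Chapter " || PySem.Str.startswith l "**Chapter "
def pvIsSep (l : String) : Bool := l == "---" || l == ""

def pvFT (l : String) : String := PySem.Str.strip (PySem.Str.slice l (some 2) none)
def pvFBy (l : String) : String := PySem.Str.strip (PySem.Str.slice l (some 3) none)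

def pvChapterTitle (l : String) : String :=
  if PySem.Str.startswith l "## Chapter " then PySem.Str.strip (PySem.Str.slice l (some 3) none)
  else PySem.Str.strip (PySem.Str.replace l "**" "")

-- _drop_first: remove the first line matching p (if any)
def pvDropFirst (p : String → Bool) : List String → List String
  | [] => []
  | l :: ls => if p l then ls else l :: pvDropFirst p ls

def pvMkChapter (header : String) (body : List String) : List (String × String) :=
  [("title", pvChapterTitle header),
   ("content", PySem.Str.strip (PySem.Str.join "\n" (body.dropWhile pvIsSep)))]

-- the while-loop over segments: head is a header, body runs to the next header
def pvChapters : List String → List (List (String × String))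
  | [] => []
  | h :: ls =>
      pvMkChapter h (ls.takeWhile (fun x => !pvIsHeader x)) ::
        pvChapters (ls.dropWhile (fun x => !pvIsHeader x))
  termination_by xs => xs.length
  decreasing_by
    simp only [List.length_cons, Nat.lt_succ_iff]
    exact List.length_dropWhile_le (fun x => !pvIsHeader x) ls

def parse_manuscript_alt (content : String) : Option String × Option String × (List (List (String × String))) :=
  let stripped := ((PySem.Str.split? content "\n").getD []).map PySem.Str.strip
  let title := (stripped.find? pvIsT).map pvFT
  let author := (stripped.find? pvIsBy).map pvFBy
  let rest := pvDropFirst pvIsBy (pvDropFirst pvIsT stripped)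
  (title, author, pvChapters (rest.dropWhile (fun x => !pvIsHeader x)))

-- ===== PRECONDITION & SPEC =====
def Spec_parse_manuscript (content : String) (out : Option String × Option String × (List (List (String × String)))) : Prop := out = parse_manuscript_alt content
instance (content : String) (out : Option String × Option String × (List (List (String × String)))) : Decidable (Spec_parse_manuscript content out) := by unfold Spec_parse_manuscript; infer_instance

-- ===== CLAIM (what is proved, stated in full; the proofs are below) =====
def Claim_equal_parse_manuscript : Prop := ∀ (content : String), Dom_parse_manuscript content → Spec_parse_manuscript content (parse_manuscript content)

-- ===== LEMMAS AND PROOFS =====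

-- proof-only: what A's loop contributes to the chapter list from state (cur, acc) over remaining lines
def pvKept (acc body : List String) : List String :=
  if acc = [] then body.dropWhile pvIsSep else acc ++ body

def pvRunPart : Option String → List String → List String → List (List (String × String))
  | none, _, xs => pvChapters (xs.dropWhile (fun x => !pvIsHeader x))
  | some ch, acc, xs =>
      [("title", ch),
       ("content", PySem.Str.strip (PySem.Str.join "\n" (pvKept acc (xs.takeWhile (fun x => !pvIsHeader x)))))] ::
        pvChapters (xs.dropWhile (fun x => !pvIsHeader x))

-- two literal strings, neither a prefix of the other, cannot both be prefixes of l
lemma pvSwExcl (l p q : String) (h2 : ¬ (p.toList <+: q.toList)) (h3 : ¬ (q.toList <+: p.toList))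
    (hp : PySem.Str.startswith l p = true) : PySem.Str.startswith l q = false := by
  by_contra h
  rw [Bool.not_eq_false] at h
  rw [PySem.Str.startswith_eq, PySem.Chars.startswith_iff] at hp h
  rcases List.prefix_or_prefix_of_prefix hp h with hc | hc
  · exact h2 hc
  · exact h3 hc

lemma pvRunPart_none_cons (L : String) (xs : List String) (h : pvIsHeader L = false)
    (acc : List String) : pvRunPart none acc (L :: xs) = pvRunPart none acc xs := by
  simp [pvRunPart, List.dropWhile_cons, h]

lemma pvRunPart_some_cons_sep (L : String) (xs : List String) (ch : String)
    (h : pvIsHeader L = false) (hs : pvIsSep L = true) :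
    pvRunPart (some ch) [] (L :: xs) = pvRunPart (some ch) [] xs := by
  simp [pvRunPart, List.dropWhile_cons, List.takeWhile_cons, h, pvKept, hs]

lemma pvRunPart_some_cons_keep (L : String) (xs : List String) (ch : String) (acc : List String)
    (h : pvIsHeader L = false) (hk : ¬(pvIsSep L = true ∧ acc = [])) :
    pvRunPart (some ch) acc (L :: xs) = pvRunPart (some ch) (acc ++ [L]) xs := by
  by_cases hacc : acc = []
  · have hs : pvIsSep L = false := by
      cases e : pvIsSep L
      · rfl
      · exact absurd ⟨e, hacc⟩ hk
    simp [pvRunPart, List.dropWhile_cons, List.takeWhile_cons, h, pvKept, hacc, hs]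
  · simp [pvRunPart, List.dropWhile_cons, List.takeWhile_cons, h, pvKept, hacc]

lemma pvRunPart_none_cons_header (L : String) (xs : List String) (hH : pvIsHeader L = true)
    (acc : List String) :
    pvRunPart none acc (L :: xs) = pvRunPart (some (pvChapterTitle L)) [] xs := by
  simp [pvRunPart, List.dropWhile_cons, hH, pvChapters, pvMkChapter, pvKept]

lemma pvRunPart_some_cons_header (L : String) (xs : List String) (ch : String) (acc : List String)
    (hH : pvIsHeader L = true) :
    pvRunPart (some ch) acc (L :: xs) =
      [("title", ch), ("content", PySem.Str.strip (PySem.Str.join "\n" acc))] ::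
        pvRunPart (some (pvChapterTitle L)) [] xs := by
  by_cases hacc : acc = [] <;>
    simp [pvRunPart, List.dropWhile_cons, List.takeWhile_cons, hH, pvChapters, pvMkChapter,
      pvKept, hacc]

lemma pvALoop_eq : ∀ (lines : List String) (title author : Option String)
    (chapters : List (List (String × String))) (cur : Option String) (acc : List String),
    pvALoop lines title author chapters cur acc =
      (title.or (((lines.map PySem.Str.strip).find? pvIsT).map pvFT),
       author.or (((lines.map PySem.Str.strip).find? pvIsBy).map pvFBy),
       chapters ++ pvRunPart cur acc
         (let r1 := if title.isNone then pvDropFirst pvIsT (lines.map PySem.Str.strip)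
                    else lines.map PySem.Str.strip
          if author.isNone then pvDropFirst pvIsBy r1 else r1)) := by
  intro lines
  induction lines with
  | nil =>
    intro title author chapters cur acc
    cases cur with
    | none => simp [pvALoop, pvRunPart, pvChapters, pvDropFirst]
    | some ch =>
      by_cases hacc : acc = [] <;>
        simp [pvALoop, pvRunPart, pvKept, pvChapters, pvDropFirst, hacc]
  | cons l rest ih =>
    intro title author chapters cur acc
    simp only [List.map_cons]
    by_cases hT : PySem.Str.startswith (PySem.Str.strip l) "# " = true
    · -- class: a '# ' line
      have hB : PySem.Str.startswith (PySem.Str.strip l) "By " = false :=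
        pvSwExcl _ "# " "By " (by decide) (by decide) hT
      have hH1 : PySem.Str.startswith (PySem.Str.strip l) "## Chapter " = false :=
        pvSwExcl _ "# " "## Chapter " (by decide) (by decide) hT
      have hH2 : PySem.Str.startswith (PySem.Str.strip l) "**Chapter " = false :=
        pvSwExcl _ "# " "**Chapter " (by decide) (by decide) hT
      have hH : pvIsHeader (PySem.Str.strip l) = false := by
        simp only [pvIsHeader, hH1, hH2, Bool.or_self]
      have hne1 : PySem.Str.strip l ≠ "---" := fun e => by rw [e] at hT; exact absurd hT (by decide)
      have hne2 : PySem.Str.strip l ≠ "" := fun e => by rw [e] at hT; exact absurd hT (by decide)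
      have hS : pvIsSep (PySem.Str.strip l) = false := by simp [pvIsSep, hne1, hne2]
      have hT' : pvIsT (PySem.Str.strip l) = true := hT
      have hB' : pvIsBy (PySem.Str.strip l) = false := hB
      rw [pvALoop.eq_def]
      cases title with
      | none =>
        simp only [hT, Option.isNone_none, Bool.and_true, if_pos]
        rw [ih]
        simp [List.find?_cons, hT', hB', pvDropFirst, pvFT]
      | some t =>
        simp only [hT, hB, hH1, hH2, hS, Option.isNone_some, Bool.and_false, Bool.false_and,
          Bool.or_self, Bool.false_eq_true, not_false_iff, if_neg, if_false, pvIsSep,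
          List.isEmpty_iff]
        cases cur with
        | none =>
          simp only [Option.isSome_none, Bool.false_eq_true, if_false]
          rw [ih]
          cases author <;>
            simp [List.find?_cons, hT', hB', pvDropFirst, pvRunPart_none_cons _ _ hH]
        | some ch =>
          simp only [Option.isSome_some, if_true]
          rw [ih]
          cases author <;>
            simp [List.find?_cons, hT', hB', pvDropFirst, ih, hne1, hne2,
              pvRunPart_some_cons_keep _ _ _ _ hH (by simp [hS])]
    · rw [Bool.not_eq_true] at hT
      have hT' : pvIsT (PySem.Str.strip l) = false := hT
      by_cases hB : PySem.Str.startswith (PySem.Str.strip l) "By " = true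
      · -- class: a 'By ' line
        have hH1 : PySem.Str.startswith (PySem.Str.strip l) "## Chapter " = false :=
          pvSwExcl _ "By " "## Chapter " (by decide) (by decide) hB
        have hH2 : PySem.Str.startswith (PySem.Str.strip l) "**Chapter " = false :=
          pvSwExcl _ "By " "**Chapter " (by decide) (by decide) hB
        have hH : pvIsHeader (PySem.Str.strip l) = false := by
          simp only [pvIsHeader, hH1, hH2, Bool.or_self]
        have hne1 : PySem.Str.strip l ≠ "---" := fun e => by rw [e] at hB; exact absurd hB (by decide)
        have hne2 : PySem.Str.strip l ≠ "" := fun e => by rw [e] at hB; exact absurd hB (by decide)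
        have hS : pvIsSep (PySem.Str.strip l) = false := by simp [pvIsSep, hne1, hne2]
        have hB' : pvIsBy (PySem.Str.strip l) = true := hB
        rw [pvALoop.eq_def]
        cases author with
        | none =>
          simp only [hT, hB, Option.isNone_none, Bool.and_true, Bool.false_and,
            Bool.false_eq_true, not_false_iff, if_neg, if_pos]
          rw [ih]
          cases title with
          | none => simp [List.find?_cons, hT', hB', pvDropFirst, pvFBy]
          | some t => simp [List.find?_cons, hT', hB', pvDropFirst, pvFBy]
        | some a =>
          simp only [hT, hB, hH1, hH2, hS, Option.isNone_some, Bool.and_false, Bool.false_and,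
            Bool.or_self, Bool.false_eq_true, not_false_iff, if_neg, if_false, pvIsSep,
            List.isEmpty_iff]
          cases cur with
          | none =>
            simp only [Option.isSome_none, Bool.false_eq_true, if_false]
            rw [ih]
            cases title <;>
              simp [List.find?_cons, hT', hB', pvDropFirst, pvRunPart_none_cons _ _ hH]
          | some ch =>
            simp only [Option.isSome_some, if_true]
            rw [ih]
            cases title <;>
              simp [List.find?_cons, hT', hB', pvDropFirst, ih, hne1, hne2,
                pvRunPart_some_cons_keep _ _ _ _ hH (by simp [hS])]
      · rw [Bool.not_eq_true] at hB
        have hB' : pvIsBy (PySem.Str.strip l) = false := hB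
        by_cases hH : pvIsHeader (PySem.Str.strip l) = true
        · -- class: a chapter header line
          have hHor : (PySem.Str.startswith (PySem.Str.strip l) "## Chapter " ||
              PySem.Str.startswith (PySem.Str.strip l) "**Chapter ") = true := hH
          rw [pvALoop.eq_def]
          simp only [hT, hB, hHor, Bool.false_and, Bool.false_eq_true, not_false_iff,
            if_neg, if_pos]
          rw [ih]
          cases cur with
          | none =>
            cases title <;> cases author <;>
              simp [List.find?_cons, hT', hB', pvDropFirst,
                pvRunPart_none_cons_header _ _ hH, pvChapterTitle, List.append_assoc]
          | some ch =>
            cases title <;> cases author <;>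
              simp [List.find?_cons, hT', hB', pvDropFirst,
                pvRunPart_some_cons_header _ _ _ _ hH, pvChapterTitle, List.append_assoc]
        · rw [Bool.not_eq_true] at hH
          have hHor : (PySem.Str.startswith (PySem.Str.strip l) "## Chapter " ||
              PySem.Str.startswith (PySem.Str.strip l) "**Chapter ") = false := hH
          by_cases hsep : pvIsSep (PySem.Str.strip l) = true ∧ acc = []
          · -- class: leading separator / empty line, skipped
            have hs : ((PySem.Str.strip l == "---" || PySem.Str.strip l == "") &&
                acc.isEmpty) = true := by
              rcases hsep with ⟨h1, h2⟩
              simp only [pvIsSep] at h1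
              simp [h1, h2]
            rw [pvALoop.eq_def]
            simp only [hT, hB, hHor, hs, Bool.false_and, Bool.false_eq_true, not_false_iff,
              if_neg, if_pos]
            rw [ih]
            cases cur with
            | none =>
              cases title <;> cases author <;>
                simp [List.find?_cons, hT', hB', pvDropFirst, pvRunPart_none_cons _ _ hH]
            | some ch =>
              cases title <;> cases author <;>
                simp [List.find?_cons, hT', hB', pvDropFirst, hsep.2,
                  pvRunPart_some_cons_sep _ _ _ hH hsep.1]
          · -- class: ordinary content line
            have hs : ((PySem.Str.strip l == "---" || PySem.Str.strip l == "") &&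
                acc.isEmpty) = false := by
              by_cases h1 : pvIsSep (PySem.Str.strip l) = true
              · have h2 : acc ≠ [] := fun e => hsep ⟨h1, e⟩
                simp only [pvIsSep] at h1
                simp [h1, h2]
              · rw [Bool.not_eq_true] at h1
                simp only [pvIsSep] at h1
                simp [h1]
            rw [pvALoop.eq_def]
            simp only [hT, hB, hHor, hs, Bool.false_and, Bool.false_eq_true, not_false_iff,
              if_neg, if_false]
            cases cur with
            | none =>
              simp only [Option.isSome_none, Bool.false_eq_true, if_false]
              rw [ih]
              cases title <;> cases author <;>
                simp [List.find?_cons, hT', hB', pvDropFirst, pvRunPart_none_cons _ _ hH]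
            | some ch =>
              simp only [Option.isSome_some, if_true]
              rw [ih]
              cases title <;> cases author <;>
                simp [List.find?_cons, hT', hB', pvDropFirst,
                  pvRunPart_some_cons_keep _ _ _ _ hH hsep]

-- ===== VERDICT (by name: the statement is the Claim_ definition above) =====
theorem parse_manuscript_spec : Claim_equal_parse_manuscript := by
  intro content _
  unfold Spec_parse_manuscript parse_manuscript parse_manuscript_alt
  rw [pvALoop_eq]
  simp [pvRunPart, Option.isNone_none]
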